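-- pv_equiv track=rewrite | github.com/moleece/aoc_23 | 2023/michael/5/5.py | traceSeed_ranges
-- ===== SOURCE A (Python) =====
-- def preprocess_maps(maps):
--     # Fill in gaps with identity matching in case there's gaps.
--     newMaps = []
--     for mapping in maps:
--         m = sorted(mapping, key=lambda x: x[1])
--         if m[0][1] != 0:
--             m = [(0,0,m[0][1])] + m
--         newM = []
--         for i in range(len(m)-1):
--             newM += [m[i]]
--             if m[i][1] + m[i][2] < m[i+1][1]:
--                 start = m[i][1] + m[i][2]
--                 newM += [(start, start,  m[i+1][1] - start)]
--         newM += [m[-1]]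
--         endingPoint = m[-1][1] + m[-1][2]
--         newM += [(endingPoint, endingPoint, 100000000)]
--         newMaps += [newM]
--     return newMaps
--
-- def traceSeed_ranges(seed, length, maps):
--     maps = preprocess_maps(maps)
--     ranges = [(seed, length)]
--     for map in maps:
--         newRanges = []
--         for (rangeStart, rangeLength) in ranges:
--             for (destStart, sourceStart, mapLength) in map:
--                 i_start, i_len = intersect(sourceStart, mapLength, rangeStart, rangeLength)
--                 if i_len > 0:
--                     newRanges += [(destStart + (i_start - sourceStart), i_len)]
--         ranges = newRanges
--     return ranges
--
-- def intersect(xStart, xLen, yStart, yLen):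
--     if xStart > yStart:
--         if yStart + yLen < xStart:
--             return (-1, 0)
--         return (xStart, min(xStart+xLen, yStart+yLen)-xStart)
--     else:
--         if xStart + xLen < yStart:
--             return (-1, 0)
--         return (yStart, min(yStart+yLen, xStart+xLen)-yStart)
-- ===== SOURCE B (Python) =====
-- def traceSeed_ranges(seed, length, maps):
--     # Depth-first: push each piece through the remaining maps recursively,
--     # over a (offset, lo, hi) half-open cell representation built in one
--     # prev-end accumulator scan per map (no materialised gap-filled maps,
--     # no breadth-first range lists, no intersect helper).
--     def cells(entries):
--         out = []
--         if entries[0][1] != 0: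
--             out.append((0, 0, entries[0][1]))
--         prev = None
--         for d, s, l in entries:
--             if prev is not None and prev < s:
--                 out.append((0, prev, s))
--             out.append((d - s, s, s + l))
--             prev = s + l
--         out.append((0, prev, prev + 100000000))
--         return out
--
--     cmaps = [cells(sorted(m, key=lambda e: e[1])) for m in maps]
--
--     def trace(rs, rl, idx):
--         if idx == len(cmaps):
--             return [(rs, rl)]
--         re = rs + rl
--         out = []
--         for off, lo, hi in cmaps[idx]:
--             a = max(lo, rs)
--             b = min(hi, re)
--             if b > a:
--                 out += trace(a + off, b - a, idx + 1)
--         return out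
--
--     return trace(seed, length, 0)
-- ===== Notes on version B (the rewrite author's own statement) =====
-- stated objective: alternative
-- what changed: B replaces A's staged breadth-first pipeline (a preprocessing pass materialising gap-filled augmented maps via index loops, then per-map rebuilds of the whole range list with a branching intersect helper) by a depth-first recursion that pushes each piece through the remaining maps one seed-range at a time, over a (offset, lo, hi) half-open interval-cell representation built in a single prev-end accumulator scan per map and clipped with max/min.
import Mathlib
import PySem

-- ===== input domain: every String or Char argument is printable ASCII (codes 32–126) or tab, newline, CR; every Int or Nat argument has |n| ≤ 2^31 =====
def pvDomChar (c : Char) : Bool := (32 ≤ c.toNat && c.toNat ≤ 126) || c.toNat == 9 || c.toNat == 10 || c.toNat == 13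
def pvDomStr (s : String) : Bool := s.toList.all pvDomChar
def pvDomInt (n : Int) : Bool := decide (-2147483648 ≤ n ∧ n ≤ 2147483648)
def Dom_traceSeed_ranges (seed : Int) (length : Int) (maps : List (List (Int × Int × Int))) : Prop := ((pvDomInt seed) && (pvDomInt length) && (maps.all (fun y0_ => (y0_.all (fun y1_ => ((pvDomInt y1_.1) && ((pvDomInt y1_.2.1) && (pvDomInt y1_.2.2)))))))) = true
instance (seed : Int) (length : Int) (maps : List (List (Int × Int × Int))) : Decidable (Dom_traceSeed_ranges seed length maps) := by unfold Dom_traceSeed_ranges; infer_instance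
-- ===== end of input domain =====

-- B replaces A's staged breadth-first pipeline by a depth-first recursion over offset/interval cells (objective: alternative).

-- ===== PORT A =====

-- intersect(xStart, xLen, yStart, yLen)
def pvIntersect (xStart xLen yStart yLen : Int) : Int × Int :=
  if xStart > yStart then
    if yStart + yLen < xStart then (-1, 0)
    else (xStart, min (xStart + xLen) (yStart + yLen) - xStart)
  else
    if xStart + xLen < yStart then (-1, 0)
    else (yStart, min (yStart + yLen) (xStart + xLen) - yStart)

-- the body of preprocess_maps for ONE mapping; the pyGetD defaults are never reached under
-- Pre_ (every mapping nonempty) — they only make the port total where Python raises IndexError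
def pvPreprocessOne (mapping : List (Int × Int × Int)) : List (Int × Int × Int) :=
  let m0 := PySem.List.sorted mapping (fun x => x.2.1) false
  let m := if (PySem.List.pyGetD m0 0 (0, 0, 0)).2.1 ≠ 0
           then (0, 0, (PySem.List.pyGetD m0 0 (0, 0, 0)).2.1) :: m0 else m0
  let newM := (PySem.List.pyRange 0 ((m.length : Int) - 1) 1).foldl (fun acc i =>
      let ei := PySem.List.pyGetD m i (0, 0, 0)
      let ej := PySem.List.pyGetD m (i + 1) (0, 0, 0)
      let acc := acc ++ [ei]
      if ei.2.1 + ei.2.2 < ej.2.1 then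
        acc ++ [(ei.2.1 + ei.2.2, ei.2.1 + ei.2.2, ej.2.1 - (ei.2.1 + ei.2.2))]
      else acc) []
  let last := PySem.List.pyGetD m (-1) (0, 0, 0)
  let newM := newM ++ [last]
  newM ++ [(last.2.1 + last.2.2, last.2.1 + last.2.2, 100000000)]

def traceSeed_ranges (seed : Int) (length : Int) (maps : List (List (Int × Int × Int))) : List (Int × Int) :=
  let maps' := maps.foldl (fun acc mapping => acc ++ [pvPreprocessOne mapping]) []
  maps'.foldl (fun ranges map =>
    ranges.foldl (fun newRanges r =>
      map.foldl (fun nr e =>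
        let p := pvIntersect e.2.1 e.2.2 r.1 r.2
        if p.2 > 0 then nr ++ [(e.1 + (p.1 - e.2.1), p.2)] else nr) newRanges) [])
    [(seed, length)]

-- ===== PORT B =====

-- the 'for d, s, l in entries' tail of cells(): prev is the previous entry's end
def pvCellsLoop (prev : Int) : List (Int × Int × Int) → List (Int × Int × Int)
  | [] => [((0 : Int), prev, prev + 100000000)]
  | (d, s, l) :: rest =>
      (if prev < s then [((0 : Int), prev, s)] else []) ++ (d - s, s, s + l) :: pvCellsLoop (s + l) rest

-- cells(entries): (offset, lo, hi) half-open cells; Python raises IndexError on [] (excluded by Pre_)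
def pvCells : List (Int × Int × Int) → List (Int × Int × Int)
  | [] => []
  | (d, s, l) :: rest =>
      (if s ≠ 0 then [((0 : Int), (0 : Int), s)] else []) ++ (d - s, s, s + l) :: pvCellsLoop (s + l) rest

-- trace(rs, rl, idx): depth-first through the remaining cell maps
def pvTrace (rs rl : Int) : List (List (Int × Int × Int)) → List (Int × Int)
  | [] => [(rs, rl)]
  | cmap :: rest =>
      let re := rs + rl
      cmap.foldl (fun out c =>
        let a := max c.2.1 rs
        let b := min c.2.2 re
        if b > a then out ++ pvTrace (a + c.1) (b - a) rest else out) []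

def traceSeed_ranges_alt (seed : Int) (length : Int) (maps : List (List (Int × Int × Int))) : List (Int × Int) :=
  let cmaps := maps.map (fun m => pvCells (PySem.List.sorted m (fun e => e.2.1) false))
  pvTrace seed length cmaps

-- ===== PRECONDITION & SPEC =====
-- Pre_ excludes exactly the inputs on which Python A raises IndexError: a maps list
-- containing an empty mapping (A indexes m[0] of the sorted empty mapping; B raises there too).
def Pre_traceSeed_ranges (seed : Int) (length : Int) (maps : List (List (Int × Int × Int))) : Prop :=
  ∀ mapping ∈ maps, mapping ≠ []
instance (seed : Int) (length : Int) (maps : List (List (Int × Int × Int))) : Decidable (Pre_traceSeed_ranges seed length maps) := by unfold Pre_traceSeed_ranges; infer_instance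

def pvWitness_traceSeed_ranges : Int × Int × (List (List (Int × Int × Int))) :=
  (5, 7, [[(10, 2, 4)], [(0, 3, 2), (50, 8, 1)]])

def Spec_traceSeed_ranges (seed : Int) (length : Int) (maps : List (List (Int × Int × Int))) (out : List (Int × Int)) : Prop := out = traceSeed_ranges_alt seed length maps
instance (seed : Int) (length : Int) (maps : List (List (Int × Int × Int))) (out : List (Int × Int)) : Decidable (Spec_traceSeed_ranges seed length maps out) := by unfold Spec_traceSeed_ranges; infer_instance

-- ===== CLAIM (what is proved, stated in full; the proofs are below) =====
def Claim_equal_traceSeed_ranges : Prop := ∀ (seed : Int) (length : Int) (maps : List (List (Int × Int × Int))), Dom_traceSeed_ranges seed length maps → Pre_traceSeed_ranges seed length maps → Spec_traceSeed_ranges seed length maps (traceSeed_ranges seed length maps)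

-- ===== LEMMAS AND PROOFS =====

-- proof-side clamp of the piece [s, s+l) mapped by d against the range [rs, re)
def pvClip (rs re d s l : Int) : Option (Int × Int) :=
  let lo := max s rs
  let hi := min (s + l) re
  if hi > lo then some (d + lo - s, hi - lo) else none

-- the shape of A's augmented map, as structural recursion (proof-side mirror of A's index loop)
def pvWeave : List (Int × Int × Int) → List (Int × Int × Int)
  | [] => []
  | [e] => [e, (e.2.1 + e.2.2, e.2.1 + e.2.2, 100000000)]
  | e :: f :: rest =>
      e :: (if e.2.1 + e.2.2 < f.2.1 then
              [(e.2.1 + e.2.2, e.2.1 + e.2.2, f.2.1 - (e.2.1 + e.2.2))]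
            else []) ++ pvWeave (f :: rest)

-- pvWeave with the head entry peeled off: depends only on the previous end and the rest
def pvWeaveTail (prev : Int) : List (Int × Int × Int) → List (Int × Int × Int)
  | [] => [(prev, prev, 100000000)]
  | f :: r => (if prev < f.2.1 then [(prev, prev, f.2.1 - prev)] else []) ++ pvWeave (f :: r)

-- (dest, src, len) ↦ (offset, lo, hi)
def pvPhi (e : Int × Int × Int) : Int × Int × Int := (e.1 - e.2.1, e.2.1, e.2.1 + e.2.2)

-- A's per-range per-map output, proof-side
def pvRangeOut (entries : List (Int × Int × Int)) (r : Int × Int) : List (Int × Int) :=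
  let rs := r.1
  let re := r.1 + r.2
  let s0 := (PySem.List.pyGetD entries 0 (0, 0, 0)).2.1
  (if s0 ≠ 0 then (pvClip rs re 0 0 s0).toList else []) ++
    (pvWeave entries).flatMap (fun e => (pvClip rs re e.1 e.2.1 e.2.2).toList)

-- A's loop body on entry ei with successor ej
def pvBody (ei ej : Int × Int × Int) (acc : List (Int × Int × Int)) : List (Int × Int × Int) :=
  if ei.2.1 + ei.2.2 < ej.2.1 then
    (acc ++ [ei]) ++ [(ei.2.1 + ei.2.2, ei.2.1 + ei.2.2, ej.2.1 - (ei.2.1 + ei.2.2))]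
  else acc ++ [ei]

-- A's emit-if-positive of intersect IS the clamp
theorem pvEmit_eq_clip (d s l rs rl : Int) :
    (if (pvIntersect s l rs rl).2 > 0
     then [(d + ((pvIntersect s l rs rl).1 - s), (pvIntersect s l rs rl).2)] else []) =
    (pvClip rs (rs + rl) d s l).toList := by
  unfold pvIntersect pvClip
  split_ifs with h1 h2 h3 h4 h5 h6 h7 <;> simp_all <;>
    first
      | omega
      | (rw [if_pos (by omega)]; simp; constructor <;> omega)

-- A's gap-filling index loop, on Nat indices, yields pvWeave
theorem pvNatFold_eq (m : List (Int × Int × Int)) (h : m ≠ []) : ∀ acc : List (Int × Int × Int),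
    ((List.range (m.length - 1)).foldl
        (fun acc k => pvBody (m.getD k (0,0,0)) (m.getD (k+1) (0,0,0)) acc) acc)
      ++ [m.getLast h]
      ++ [((m.getLast h).2.1 + (m.getLast h).2.2, (m.getLast h).2.1 + (m.getLast h).2.2, 100000000)]
    = acc ++ pvWeave m := by
  induction m with
  | nil => simp at h
  | cons e t ih =>
    cases t with
    | nil => intro acc; simp [pvWeave]
    | cons f rest =>
      intro acc
      have hlen : (e :: f :: rest).length - 1 = (f :: rest).length - 1 + 1 := by simp
      rw [hlen, List.range_succ_eq_map, List.foldl_cons, List.foldl_map]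
      have hgl : (e :: f :: rest).getLast h = (f :: rest).getLast (by simp) :=
        List.getLast_cons _
      simp only [List.getD_cons_zero, List.getD_cons_succ, hgl]
      rw [PySem.List.foldl_congr_mem _ _
            (fun x y => pvBody ((f :: rest).getD y (0,0,0)) ((f :: rest).getD (y+1) (0,0,0)) x) _
            (by intro acc k _; simp),
          ih (by simp) (pvBody e f acc)]
      show _ = acc ++ pvWeave (e :: f :: rest)
      simp only [pvWeave, pvBody]
      split_ifs <;> simp

-- bridge: A's pyRange/pyGetD loop is that Nat-index loop
theorem pvLoopA (m : List (Int × Int × Int)) (acc : List (Int × Int × Int)) :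
    (PySem.List.pyRange 0 ((m.length : Int) - 1) 1).foldl (fun acc i =>
      let ei := PySem.List.pyGetD m i (0, 0, 0)
      let ej := PySem.List.pyGetD m (i + 1) (0, 0, 0)
      let acc := acc ++ [ei]
      if ei.2.1 + ei.2.2 < ej.2.1 then
        acc ++ [(ei.2.1 + ei.2.2, ei.2.1 + ei.2.2, ej.2.1 - (ei.2.1 + ei.2.2))]
      else acc) acc
    = (List.range (m.length - 1)).foldl
        (fun acc k => pvBody (m.getD k (0,0,0)) (m.getD (k+1) (0,0,0)) acc) acc := by
  rw [PySem.List.pyRange_one]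
  have hn : (((m.length : Int) - 1) - 0).toNat = m.length - 1 := by omega
  rw [hn, List.foldl_map]
  apply PySem.List.foldl_congr_mem
  intro acc k _
  have h1 : (0 : Int) + (k : Int) = ((k : Nat) : Int) := by ring
  have h2 : (k : Int) + 1 = (((k + 1 : Nat)) : Int) := by push_cast; ring
  simp only [h1, h2, PySem.List.pyGetD_natCast, pvBody]

-- A's preprocessing of one nonempty mapping = optional head identity ++ pvWeave (sorted entries)
theorem pvPreprocessOne_eq (mapping : List (Int × Int × Int)) (h : mapping ≠ []) :
    pvPreprocessOne mapping =
      (let m0 := PySem.List.sorted mapping (fun x => x.2.1) false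
       (if (PySem.List.pyGetD m0 0 (0, 0, 0)).2.1 ≠ 0
        then [((0 : Int), (0 : Int), (PySem.List.pyGetD m0 0 (0, 0, 0)).2.1)] else []) ++ pvWeave m0) := by
  have hm0 : PySem.List.sorted mapping (fun x => x.2.1) false ≠ [] := by
    simp [PySem.List.sorted_eq_nil_iff, h]
  unfold pvPreprocessOne
  set m0 := PySem.List.sorted mapping (fun x => x.2.1) false with hdef
  obtain ⟨g, t, hgt⟩ := List.exists_cons_of_ne_nil hm0
  simp only [pvLoopA]
  split_ifs with hs
  · have hne : ((0:Int), (0:Int), (PySem.List.pyGetD m0 0 (0,0,0)).2.1) :: m0 ≠ [] := by simp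
    rw [PySem.List.pyGetD_neg_one _ _ hne]
    have := pvNatFold_eq _ hne []
    simp only [List.append_assoc] at this ⊢
    rw [this, hgt]
    simp [pvWeave, PySem.List.pyGetD_zero_cons]
  · rw [PySem.List.pyGetD_neg_one _ _ hm0]
    have := pvNatFold_eq _ hm0 []
    simp only [List.append_assoc] at this ⊢
    rw [this]

-- A's innermost loop over an augmented map is append of the clamp pieces
theorem pvInnerFold (r : Int × Int) (aug : List (Int × Int × Int)) (acc : List (Int × Int)) :
    aug.foldl (fun nr e =>
        let p := pvIntersect e.2.1 e.2.2 r.1 r.2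
        if p.2 > 0 then nr ++ [(e.1 + (p.1 - e.2.1), p.2)] else nr) acc
    = acc ++ aug.flatMap (fun e => (pvClip r.1 (r.1 + r.2) e.1 e.2.1 e.2.2).toList) := by
  have hf : (fun (nr : List (Int × Int)) (e : Int × Int × Int) =>
        let p := pvIntersect e.2.1 e.2.2 r.1 r.2
        if p.2 > 0 then nr ++ [(e.1 + (p.1 - e.2.1), p.2)] else nr)
      = (fun nr e => nr ++ (pvClip r.1 (r.1 + r.2) e.1 e.2.1 e.2.2).toList) := by
    funext nr e
    show (if (pvIntersect e.2.1 e.2.2 r.1 r.2).2 > 0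
          then nr ++ [(e.1 + ((pvIntersect e.2.1 e.2.2 r.1 r.2).1 - e.2.1), (pvIntersect e.2.1 e.2.2 r.1 r.2).2)]
          else nr) = nr ++ (pvClip r.1 (r.1 + r.2) e.1 e.2.1 e.2.2).toList
    rw [← pvEmit_eq_clip]
    split <;> simp
  rw [hf, PySem.List.foldl_append_eq_flatMap]

-- one map's worth of A's scan, flat-mapped over the ranges
theorem pvPerMap (mapping : List (Int × Int × Int)) (h : mapping ≠ []) (ranges : List (Int × Int)) :
    ranges.foldl (fun newRanges r =>
      (pvPreprocessOne mapping).foldl (fun nr e =>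
        let p := pvIntersect e.2.1 e.2.2 r.1 r.2
        if p.2 > 0 then nr ++ [(e.1 + (p.1 - e.2.1), p.2)] else nr) newRanges) []
    = ranges.flatMap (pvRangeOut (PySem.List.sorted mapping (fun e => e.2.1) false)) := by
  have hone : ∀ (acc : List (Int × Int)) (r : Int × Int), r ∈ ranges →
      (pvPreprocessOne mapping).foldl (fun nr e =>
        let p := pvIntersect e.2.1 e.2.2 r.1 r.2
        if p.2 > 0 then nr ++ [(e.1 + (p.1 - e.2.1), p.2)] else nr) acc
      = acc ++ pvRangeOut (PySem.List.sorted mapping (fun e => e.2.1) false) r := by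
    intro acc r _
    rw [pvInnerFold, pvPreprocessOne_eq mapping h]
    simp only [List.flatMap_append, pvRangeOut]
    congr 1
    congr 1
    split <;> simp [pvClip]
  rw [PySem.List.foldl_congr_mem _ _ (fun acc r => acc ++ pvRangeOut (PySem.List.sorted mapping (fun e => e.2.1) false) r) _ hone,
      PySem.List.foldl_append_eq_flatMap]
  simp

-- B's cells-loop is pvWeaveTail through pvPhi
theorem pvCellsLoop_eq (rest : List (Int × Int × Int)) : ∀ prev : Int,
    pvCellsLoop prev rest = (pvWeaveTail prev rest).map pvPhi := by
  induction rest with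
  | nil => intro prev; simp [pvCellsLoop, pvWeaveTail, pvPhi]
  | cons f r ih =>
    intro prev
    obtain ⟨d, s, l⟩ := f
    have hw : pvWeave ((d, s, l) :: r) = (d, s, l) :: pvWeaveTail (s + l) r := by
      cases r <;> simp [pvWeave, pvWeaveTail]
    simp only [pvCellsLoop, pvWeaveTail, hw, ih]
    split_ifs with hg <;> simp [pvPhi]

-- B's cells(entries) = head identity cell ++ the image of A's weave
theorem pvCells_eq (entries : List (Int × Int × Int)) (h : entries ≠ []) :
    pvCells entries =
      (if (PySem.List.pyGetD entries 0 (0, 0, 0)).2.1 ≠ 0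
       then [((0 : Int), (0 : Int), (PySem.List.pyGetD entries 0 (0, 0, 0)).2.1)] else []) ++
      (pvWeave entries).map pvPhi := by
  obtain ⟨⟨d, s, l⟩, rest, rfl⟩ := List.exists_cons_of_ne_nil h
  have hw : pvWeave ((d, s, l) :: rest) = (d, s, l) :: pvWeaveTail (s + l) rest := by
    cases rest <;> simp [pvWeave, pvWeaveTail]
  simp [pvCells, pvCellsLoop_eq, hw, PySem.List.pyGetD_zero_cons, pvPhi]

-- B's clamp of a φ-image cell is pvClip
theorem pvClipCell_eq (e : Int × Int × Int) (rs re : Int) :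
    (let c := pvPhi e
     let a := max c.2.1 rs
     let b := min c.2.2 re
     if b > a then [(a + c.1, b - a)] else [])
    = (pvClip rs re e.1 e.2.1 e.2.2).toList := by
  obtain ⟨d, s, l⟩ := e
  simp only [pvPhi, pvClip]
  split_ifs with h1 <;> (simp; try omega)

-- one level of pvTrace: clamp the cells, then recurse on each emitted piece
theorem pvTrace_cons (rs rl : Int) (cmap : List (Int × Int × Int))
    (rest : List (List (Int × Int × Int))) :
    pvTrace rs rl (cmap :: rest) =
      (cmap.flatMap (fun c =>
          let a := max c.2.1 rs
          let b := min c.2.2 (rs + rl)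
          if b > a then [(a + c.1, b - a)] else [])).flatMap
        (fun r => pvTrace r.1 r.2 rest) := by
  show cmap.foldl _ [] = _
  have : (fun (out : List (Int × Int)) (c : Int × Int × Int) =>
        let a := max c.2.1 rs
        let b := min c.2.2 (rs + rl)
        if b > a then out ++ pvTrace (a + c.1) (b - a) rest else out)
      = (fun out c => out ++
          ((fun c =>
            let a := max c.2.1 rs
            let b := min c.2.2 (rs + rl)
            if b > a then [(a + c.1, b - a)] else []) c).flatMap (fun r => pvTrace r.1 r.2 rest)) := by
    funext out c
    by_cases h : min c.2.2 (rs + rl) > max c.2.1 rs <;> simp [h]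
  rw [this, PySem.List.foldl_append_eq_flatMap, List.nil_append]
  exact List.flatMap_assoc.symm

-- a range's pieces through one map: B's cell clamp equals A's pvRangeOut
theorem pvCellPieces_eq (mapping : List (Int × Int × Int)) (h : mapping ≠ []) (rs rl : Int) :
    (pvCells (PySem.List.sorted mapping (fun e => e.2.1) false)).flatMap (fun c =>
        let a := max c.2.1 rs
        let b := min c.2.2 (rs + rl)
        if b > a then [(a + c.1, b - a)] else [])
    = pvRangeOut (PySem.List.sorted mapping (fun e => e.2.1) false) (rs, rl) := by
  have hm0 : PySem.List.sorted mapping (fun e => e.2.1) false ≠ [] := by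
    simp [PySem.List.sorted_eq_nil_iff, h]
  rw [pvCells_eq _ hm0]
  simp only [pvRangeOut, List.flatMap_append, List.flatMap_map]
  congr 1
  · split_ifs with hs
    · rw [List.flatMap_singleton]
      simp only [pvClip, zero_add]
      split_ifs <;> simp
    · simp
  · exact List.flatMap_congr (fun e _ => pvClipCell_eq e rs (rs + rl))

-- BFS over maps equals DFS per starting range
theorem pvBFS_DFS (maps : List (List (Int × Int × Int))) (hp : ∀ m ∈ maps, m ≠ []) :
    ∀ ranges : List (Int × Int),
    maps.foldl (fun rg m => rg.flatMap (pvRangeOut (PySem.List.sorted m (fun e => e.2.1) false))) ranges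
    = ranges.flatMap (fun r =>
        pvTrace r.1 r.2 (maps.map (fun m => pvCells (PySem.List.sorted m (fun e => e.2.1) false)))) := by
  induction maps with
  | nil => intro ranges; simp [pvTrace]
  | cons m ms ih =>
    intro ranges
    have hm : m ≠ [] := hp m (by simp)
    rw [List.foldl_cons, ih (fun x hx => hp x (by simp [hx])), List.flatMap_assoc]
    apply List.flatMap_congr
    intro r _
    rw [List.map_cons, pvTrace_cons, pvCellPieces_eq m hm r.1 r.2]

-- ===== VERDICT (by name: the statement is the Claim_ definition above) =====
theorem traceSeed_ranges_spec : Claim_equal_traceSeed_ranges := by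
  intro seed length maps _ hpre
  unfold Spec_traceSeed_ranges traceSeed_ranges traceSeed_ranges_alt
  rw [PySem.List.foldl_append_singleton_eq_map, List.nil_append, List.foldl_map]
  have h1 : ∀ (ranges : List (Int × Int)) (mapping : List (Int × Int × Int)), mapping ∈ maps →
      (ranges.foldl (fun newRanges r =>
        (pvPreprocessOne mapping).foldl (fun nr e =>
          let p := pvIntersect e.2.1 e.2.2 r.1 r.2
          if p.2 > 0 then nr ++ [(e.1 + (p.1 - e.2.1), p.2)] else nr) newRanges) [])
      = ranges.flatMap (pvRangeOut (PySem.List.sorted mapping (fun e => e.2.1) false)) := by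
    intro ranges mapping hmem
    exact pvPerMap mapping (hpre mapping hmem) ranges
  rw [PySem.List.foldl_congr_mem _ _
        (fun rg m => rg.flatMap (pvRangeOut (PySem.List.sorted m (fun e => e.2.1) false))) _ h1,
      pvBFS_DFS maps hpre]
  simp
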